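-- pv_equiv track=rewrite | github.com/OperationFman/LeetCode | CodeSignal/matrixElementsSum.py | matrixElementsSum
-- ===== SOURCE A (Python) =====
-- def matrixElementsSum(matrix):
--     counter = 0
--
--     for i in range(len(matrix)):
--         for j in range(len(matrix[i])): # needed to iterate over the matrix
--             if matrix[i][j] != 0: # If it's a number
--                 if i == 0: # Row 1 will enver have a nothing above it, so might aswell count it
--                     counter += matrix[i][j]
--                 elif matrix[i - 1][j] != 0: # This is actually redundant now, if it exists then it's valid
--                     counter += matrix[i][j]
--             else:
--                 for x in range(len(matrix)): # If a ghost is found, set all values below to 0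
--                     matrix[x][j] = 0
--
--     return counter
-- ===== SOURCE B (Python) =====
-- def matrixElementsSum(matrix):
--     # One pass over the rows: a column goes "dead" at its first zero;
--     # live-column values are summed as we go. Does not mutate the input.
--     dead = set()
--     total = 0
--     for row in matrix:
--         for j, v in enumerate(row):
--             if v == 0:
--                 dead.add(j)
--             elif j not in dead:
--                 total += v
--     return total
-- ===== Notes on version B (the rewrite author's own statement) =====
-- stated objective: faster
-- what changed: Replaces the mutate-in-place scan, which re-zeroes an entire column on every zero it meets and re-reads the cell above, by a single pass that tracks dead columns in a set and never mutates the input matrix.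
-- outside the precondition, e.g. on matrixElementsSum([[1], []]): A returns 1, B returns 1; on matrixElementsSum([[1, 2], [3]]): A returns 6, B returns 6
import Mathlib
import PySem

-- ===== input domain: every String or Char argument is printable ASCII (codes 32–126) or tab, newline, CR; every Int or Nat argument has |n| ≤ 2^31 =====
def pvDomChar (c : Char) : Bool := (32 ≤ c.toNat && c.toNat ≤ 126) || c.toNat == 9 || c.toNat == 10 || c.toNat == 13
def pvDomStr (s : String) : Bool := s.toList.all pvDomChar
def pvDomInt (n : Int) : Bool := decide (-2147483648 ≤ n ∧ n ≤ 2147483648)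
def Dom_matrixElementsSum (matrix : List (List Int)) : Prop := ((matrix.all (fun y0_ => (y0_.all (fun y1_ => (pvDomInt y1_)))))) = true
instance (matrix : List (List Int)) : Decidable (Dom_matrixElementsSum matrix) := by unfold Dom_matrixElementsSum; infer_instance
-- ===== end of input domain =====

-- B replaces A's mutate-in-place column zeroing by a single non-mutating pass with a dead-column
-- set (A mutates its argument; the equivalence proved here is about the return value only).

-- ===== PORT A =====
-- inner 'for x in range(len(matrix)): matrix[x][j] = 0'
def pvZeroColumn (m : List (List Int)) (j : Int) : List (List Int) :=
  (PySem.List.pyRange 0 m.length 1).foldl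
    (fun m x => PySem.List.pySetD m x (PySem.List.pySetD (PySem.List.pyGetD m x []) j 0)) m

def matrixElementsSum (matrix : List (List Int)) : Int :=
  ((PySem.List.pyRange 0 matrix.length 1).foldl
    (fun st i =>
      (PySem.List.pyRange 0 (PySem.List.pyGetD st.1 i []).length 1).foldl
        (fun st j =>
          let v := PySem.List.pyGetD (PySem.List.pyGetD st.1 i []) j 0
          if v ≠ 0 then
            if i = 0 then (st.1, st.2 + v)
            else if PySem.List.pyGetD (PySem.List.pyGetD st.1 (i - 1) []) j 0 ≠ 0 then (st.1, st.2 + v)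
            else st
          else (pvZeroColumn st.1 j, st.2))
        st)
    (matrix, (0 : Int))).2

-- ===== PORT B =====
def matrixElementsSum_alt (matrix : List (List Int)) : Int :=
  (matrix.foldl
    (fun (st : PySem.Set Int × Int) row =>
      (PySem.List.enumerate row 0).foldl
        (fun st p =>
          if p.2 = 0 then (PySem.Set.add st.1 p.1, st.2)
          else if PySem.Set.contains st.1 p.1 then st
          else (st.1, st.2 + p.2))
        st)
    ((PySem.Set.empty : PySem.Set Int), (0 : Int))).2

-- ===== PRECONDITION & SPEC =====
-- Pre_ restricts to rectangular matrices (all rows of one length): on ragged input A can raise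
-- IndexError (zeroing a column across a shorter row, or reading the shorter previous row); on the
-- ragged inputs where A does return, B happens to agree anyway (see claim cites).
def Pre_matrixElementsSum (matrix : List (List Int)) : Prop :=
  ∀ row ∈ matrix, row.length = (matrix.headD []).length
instance (matrix : List (List Int)) : Decidable (Pre_matrixElementsSum matrix) := by
  unfold Pre_matrixElementsSum; infer_instance

def pvWitness_matrixElementsSum : List (List Int) := [[1, 2], [0, 3], [4, 5]]

def Spec_matrixElementsSum (matrix : List (List Int)) (out : Int) : Prop := out = matrixElementsSum_alt matrix
instance (matrix : List (List Int)) (out : Int) : Decidable (Spec_matrixElementsSum matrix out) := by unfold Spec_matrixElementsSum; infer_instance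

-- ===== CLAIM (what is proved, stated in full; the proofs are below) =====
def Claim_equal_matrixElementsSum : Prop := ∀ (matrix : List (List Int)), Dom_matrixElementsSum matrix → Pre_matrixElementsSum matrix → Spec_matrixElementsSum matrix (matrixElementsSum matrix)

-- ===== LEMMAS AND PROOFS =====

-- `pvMask S m` is the matrix m with every column whose index is in S zeroed out:
-- the shape of A's mutated matrix at any point of its scan.
def pvMaskRow (S : List Int) (s : Int) : List Int → List Int
  | [] => []
  | v :: r => (if PySem.Set.contains S s then 0 else v) :: pvMaskRow S (s + 1) r

def pvMask (S : List Int) (m : List (List Int)) : List (List Int) := m.map (pvMaskRow S 0)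

-- Nat-index reformulation of A's loops (the pyRange/pyGetD/pySetD layer peeled off).
def pvZeroColN (m : List (List Int)) (j : Nat) : List (List Int) :=
  m.map (fun row => row.set j 0)

def pvStepN (i : Nat) (st : List (List Int) × Int) (j : Nat) : List (List Int) × Int :=
  let v := (st.1.getD i []).getD j 0
  if v ≠ 0 then
    if i = 0 then (st.1, st.2 + v)
    else if (st.1.getD (i - 1) []).getD j 0 ≠ 0 then (st.1, st.2 + v)
    else st
  else (pvZeroColN st.1 j, st.2)

def pvRowN (i : Nat) (st : List (List Int) × Int) : List (List Int) × Int :=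
  (List.range (st.1.getD i []).length).foldl (pvStepN i) st

-- B's inner fold, with an arbitrary enumerate start (to recurse on a row suffix).
def pvRowB (r : List Int) (s : Int) (st : List Int × Int) : List Int × Int :=
  (PySem.List.enumerate r s).foldl
    (fun st p =>
      if p.2 = 0 then (PySem.Set.add st.1 p.1, st.2)
      else if PySem.Set.contains st.1 p.1 then st
      else (st.1, st.2 + p.2))
    st

theorem pvMaskRow_length (S : List Int) (s : Int) (r : List Int) :
    (pvMaskRow S s r).length = r.length := by
  induction r generalizing s with
  | nil => rfl
  | cons v r ih => simp [pvMaskRow, ih]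

theorem pvMaskRow_congr (S S' : List Int) (s : Int) (r : List Int)
    (h : ∀ x : Int, s ≤ x → (x ∈ S ↔ x ∈ S')) :
    pvMaskRow S s r = pvMaskRow S' s r := by
  induction r generalizing s with
  | nil => rfl
  | cons v r ih =>
      have hs := h s le_rfl
      have : pvMaskRow S (s + 1) r = pvMaskRow S' (s + 1) r :=
        ih (s + 1) (fun x hx => h x (by omega))
      simp [pvMaskRow, hs, this]

theorem pvMaskRow_getD (S : List Int) (s : Int) (r : List Int) (j : Nat) (hj : j < r.length) :
    (pvMaskRow S s r).getD j 0 =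
      if PySem.Set.contains S (s + j) then 0 else r.getD j 0 := by
  induction r generalizing s j with
  | nil => simp at hj
  | cons v r ih =>
      cases j with
      | zero => simp [pvMaskRow]
      | succ j =>
          have := ih (s + 1) j (by simpa using hj)
          simpa [pvMaskRow, add_assoc, add_comm, add_left_comm] using this

theorem pvMaskRow_set (S : List Int) (s : Int) (r : List Int) (j : Nat) :
    (pvMaskRow S s r).set j 0 = pvMaskRow (S ++ [s + (j : Int)]) s r := by
  induction r generalizing s j with
  | nil => rfl
  | cons v r ih =>
      cases j with
      | zero =>
          have htail : pvMaskRow S (s + 1) r = pvMaskRow (S ++ [s]) (s + 1) r :=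
            pvMaskRow_congr _ _ _ _ (fun x hx => by
              simp only [List.mem_append, List.mem_singleton]
              constructor
              · exact Or.inl
              · rintro (hx' | rfl)
                · exact hx'
                · omega)
          simp [pvMaskRow, htail]
      | succ j =>
          have hhead : (s ∈ S ++ [s + (((j : Nat) + 1 : Nat) : Int)]) ↔ s ∈ S := by
            simp only [List.mem_append, List.mem_singleton]
            constructor
            · rintro (hx' | h')
              · exact hx'
              · omega
            · exact Or.inl
          have harith : (s + 1) + (j : Int) = s + (((j : Nat) + 1 : Nat) : Int) := by push_cast; ring
          simp only [pvMaskRow, List.set_cons_succ, ih (s + 1) j, harith]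
          have hne : ¬((j : Int) + 1 = 0) := by omega
          simp [hne]

theorem pvMaskRow_empty (s : Int) (r : List Int) : pvMaskRow [] s r = r := by
  induction r generalizing s <;> simp [pvMaskRow, *]

theorem pvMask_nil (m : List (List Int)) : pvMask [] m = m := by
  unfold pvMask
  induction m with
  | nil => rfl
  | cons r m ih => simp [pvMaskRow_empty, ih]

theorem pvMask_getD (S : List Int) (m : List (List Int)) (i : Nat) :
    (pvMask S m).getD i [] = pvMaskRow S 0 (m.getD i []) := by
  induction m generalizing i with
  | nil => cases i <;> rfl
  | cons r m ih =>
      cases i with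
      | zero => simp [pvMask]
      | succ n => simpa [pvMask, List.getD_cons_succ] using ih n

-- zeroing a column of a masked matrix = masking with the column added
theorem pvMask_zeroCol (S : List Int) (m : List (List Int)) (j : Nat) :
    pvZeroColN (pvMask S m) j = pvMask (S ++ [(j : Int)]) m := by
  simp only [pvZeroColN, pvMask, List.map_map]
  refine List.map_congr_left fun r _ => ?_
  simpa using pvMaskRow_set S 0 r j

theorem pvMask_add (S : List Int) (m : List (List Int)) (j : Int) :
    pvMask (S ++ [j]) m = pvMask (PySem.Set.add S j) m := by
  by_cases h : j ∈ S
  · rw [PySem.Set.add_of_mem h]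
    exact List.map_congr_left fun r _ =>
      pvMaskRow_congr _ _ 0 r (by
        intro x _
        simp only [List.mem_append, List.mem_singleton]
        exact ⟨fun hx => hx.elim id (fun e => e ▸ h), Or.inl⟩)
  · rw [PySem.Set.add_of_not_mem h]

-- the inner-row simulation
theorem pvInner (M : List (List Int)) (w : Nat) (hw : ∀ r ∈ M, r.length = w)
    (i : Nat) (hi : i < M.length) :
    ∀ (len j : Nat) (T : List Int) (c : Int), j + len = w →
      (i ≠ 0 → ∀ jj : Nat, jj < w → ((jj : Int) ∉ T) →
        (M.getD (i - 1) []).getD jj 0 ≠ 0) →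
      (List.range' j len).foldl (pvStepN i) (pvMask T M, c)
          = (pvMask (pvRowB ((M.getD i []).drop j) (j : Int) (T, c)).1 M,
             (pvRowB ((M.getD i []).drop j) (j : Int) (T, c)).2)
        ∧ (∀ x ∈ T, x ∈ (pvRowB ((M.getD i []).drop j) (j : Int) (T, c)).1)
        ∧ (∀ jj : Nat, j ≤ jj → jj < w → (M.getD i []).getD jj 0 = 0 →
            (jj : Int) ∈ (pvRowB ((M.getD i []).drop j) (j : Int) (T, c)).1) := by
  have hrmem : M.getD i [] ∈ M := by
    rw [List.getD_eq_getElem _ _ hi]; exact List.getElem_mem hi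
  have hrlen : (M.getD i []).length = w := hw _ hrmem
  intro len
  induction len with
  | zero =>
      intro j T c hjw hprev
      have hdrop : (M.getD i []).drop j = [] := List.drop_eq_nil_of_le (by omega)
      rw [hdrop]
      refine ⟨rfl, fun x hx => hx, fun jj h1 h2 _ => absurd h2 (by omega)⟩
  | succ len ih =>
      intro j T c hjw hprev
      have hjlt : j < (M.getD i []).length := by omega
      have hstep1 : (M.getD i []).drop j = (M.getD i [])[j] :: (M.getD i []).drop (j + 1) :=
        List.drop_eq_getElem_cons hjlt
      have hgetj : (M.getD i [])[j] = (M.getD i []).getD j 0 :=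
        (List.getD_eq_getElem _ _ hjlt).symm
      have hcast : ((j : Int) + 1) = (((j + 1 : Nat)) : Int) := by push_cast; ring
      have hrowB : ∀ (st : List Int × Int),
          pvRowB ((M.getD i []).drop j) (j : Int) st
            = pvRowB ((M.getD i []).drop (j + 1)) ((j + 1 : Nat) : Int)
                (if (M.getD i []).getD j 0 = 0 then (PySem.Set.add st.1 (j : Int), st.2)
                 else if PySem.Set.contains st.1 (j : Int) then st
                 else (st.1, st.2 + (M.getD i []).getD j 0)) := by
        intro st
        rw [hstep1]
        simp only [pvRowB, PySem.List.enumerate_cons, List.foldl_cons, hcast, hgetj]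
      have hv : ((pvMask T M).getD i []).getD j 0
          = if PySem.Set.contains T (0 + (j : Int)) then 0 else (M.getD i []).getD j 0 := by
        rw [pvMask_getD]; exact pvMaskRow_getD T 0 _ j hjlt
      rw [List.range'_succ, List.foldl_cons]
      by_cases hz : (M.getD i []).getD j 0 = 0
      · -- a zero cell (whether or not the column is already dead): A zeroes the column, B adds j
        have hA : pvStepN i (pvMask T M, c) j = (pvMask (PySem.Set.add T (j : Int)) M, c) := by
          have hv0 : ((pvMask T M).getD i []).getD j 0 = 0 := by
            rw [hv]; split_ifs
            · rfl
            · exact hz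
          simp only [pvStepN, hv0, ne_eq, not_true_eq_false, if_false]
          rw [pvMask_zeroCol, pvMask_add]
        have hprev' : i ≠ 0 → ∀ jj : Nat, jj < w → ((jj : Int) ∉ PySem.Set.add T (j : Int)) →
            (M.getD (i - 1) []).getD jj 0 ≠ 0 := by
          intro h0 jj h1 h2
          exact hprev h0 jj h1 (fun hx => h2 ((PySem.Set.mem_add T _ _).2 (Or.inl hx)))
        obtain ⟨ih1, ih2, ih3⟩ := ih (j + 1) (PySem.Set.add T (j : Int)) c (by omega) hprev'
        rw [hrowB, if_pos hz]
        refine ⟨by rw [hA]; exact ih1, ?_, ?_⟩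
        · intro x hx
          exact ih2 x ((PySem.Set.mem_add T _ _).2 (Or.inl hx))
        · intro jj h1 h2 h3
          rcases Nat.eq_or_lt_of_le h1 with rfl | hlt
          · exact ih2 _ ((PySem.Set.mem_add T _ _).2 (Or.inr rfl))
          · exact ih3 jj (by omega) h2 h3
      · by_cases hmem : (j : Int) ∈ T
        · -- dead column, nonzero original cell: A reads 0 and re-zeroes (a no-op), B skips
          have hA : pvStepN i (pvMask T M, c) j = (pvMask T M, c) := by
            have hv0 : ((pvMask T M).getD i []).getD j 0 = 0 := by
              rw [hv]; simp [hmem]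
            simp only [pvStepN, hv0, ne_eq, not_true_eq_false, if_false]
            rw [pvMask_zeroCol, pvMask_add, PySem.Set.add_of_mem hmem]
          obtain ⟨ih1, ih2, ih3⟩ := ih (j + 1) T c (by omega) hprev
          rw [hrowB, if_neg hz, if_pos (by simpa using hmem)]
          refine ⟨by rw [hA]; exact ih1, ih2, ?_⟩
          intro jj h1 h2 h3
          rcases Nat.eq_or_lt_of_le h1 with rfl | hlt
          · exact absurd h3 hz
          · exact ih3 jj (by omega) h2 h3
        · -- live column, nonzero cell: both sides add the value
          have hvv : ((pvMask T M).getD i []).getD j 0 = (M.getD i []).getD j 0 := by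
            rw [hv]; simp [hmem]
          have hA : pvStepN i (pvMask T M, c) j
              = (pvMask T M, c + (M.getD i []).getD j 0) := by
            by_cases hi0 : i = 0
            · subst hi0
              simp only [pvStepN]
              rw [hvv, if_pos hz]
              simp
            · have hprevrow : M.getD (i - 1) [] ∈ M := by
                rw [List.getD_eq_getElem _ _ (by omega : i - 1 < M.length)]
                exact List.getElem_mem _
              have hplen : j < (M.getD (i - 1) []).length := by rw [hw _ hprevrow]; omega
              have habove : ((pvMask T M).getD (i - 1) []).getD j 0
                  = (M.getD (i - 1) []).getD j 0 := by
                rw [pvMask_getD, pvMaskRow_getD T 0 _ j hplen]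
                simp [hmem]
              have hnz2 : (M.getD (i - 1) []).getD j 0 ≠ 0 :=
                hprev hi0 j (by omega) hmem
              simp only [pvStepN]
              rw [hvv, if_pos hz, if_neg hi0, habove, if_pos hnz2]
          obtain ⟨ih1, ih2, ih3⟩ := ih (j + 1) T (c + (M.getD i []).getD j 0) (by omega) hprev
          rw [hrowB, if_neg hz, if_neg (by simpa using hmem)]
          refine ⟨by rw [hA]; exact ih1, ih2, ?_⟩
          intro jj h1 h2 h3
          rcases Nat.eq_or_lt_of_le h1 with rfl | hlt
          · exact absurd h3 hz
          · exact ih3 jj (by omega) h2 h3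

-- the outer simulation
theorem pvOuterSim (M : List (List Int)) (w : Nat) (hw : ∀ r ∈ M, r.length = w) :
    ∀ k, k ≤ M.length →
      (List.range k).foldl (fun st i => pvRowN i st) (M, 0)
          = (pvMask ((M.take k).foldl (fun st row => pvRowB row 0 st) ([], 0)).1 M,
             ((M.take k).foldl (fun st row => pvRowB row 0 st) ([], 0)).2)
        ∧ (∀ jj : Nat, jj < w →
            ((jj : Int) ∉ ((M.take k).foldl (fun st row => pvRowB row 0 st) ([], 0)).1) →
            ∀ i' : Nat, i' < k → (M.getD i' []).getD jj 0 ≠ 0) := by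
  intro k
  induction k with
  | zero =>
      intro _
      exact ⟨by simp [pvMask_nil], fun jj _ _ i' hi' => absurd hi' (Nat.not_lt_zero _)⟩
  | succ k ih =>
      intro hk1
      have hk : k < M.length := by omega
      obtain ⟨ih1, ih2⟩ := ih (by omega)
      cases hP : (M.take k).foldl (fun st row => pvRowB row 0 st) ([], 0) with
      | mk S cc =>
      rw [hP] at ih1 ih2
      have hfold : (M.take (k + 1)).foldl (fun st row => pvRowB row 0 st) ([], 0)
          = pvRowB (M.getD k []) 0 (S, cc) := by
        rw [List.take_succ, List.foldl_append, hP, List.getElem?_eq_getElem hk]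
        simp only [Option.toList_some, List.foldl_cons, List.foldl_nil]
        rw [List.getD_eq_getElem _ _ hk]
      rw [List.range_succ, List.foldl_append, List.foldl_cons, List.foldl_nil, ih1]
      have hmem : M.getD k [] ∈ M := by
        rw [List.getD_eq_getElem _ _ hk]; exact List.getElem_mem hk
      have hrowlen : ((pvMask S M).getD k []).length = w := by
        rw [pvMask_getD, pvMaskRow_length]; exact hw _ hmem
      have hprev : k ≠ 0 → ∀ jj : Nat, jj < w → ((jj : Int) ∉ S) →
          (M.getD (k - 1) []).getD jj 0 ≠ 0 :=
        fun h0 jj h1 h2 => ih2 jj h1 h2 (k - 1) (by omega)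
      obtain ⟨e1, e2, e3⟩ := pvInner M w hw k hk w 0 S cc (by omega) hprev
      simp only [List.drop_zero, Nat.cast_zero] at e1 e2 e3
      have hrow : pvRowN k (pvMask S M, cc)
          = (pvMask (pvRowB (M.getD k []) 0 (S, cc)).1 M,
             (pvRowB (M.getD k []) 0 (S, cc)).2) := by
        unfold pvRowN
        simp only
        rw [hrowlen, List.range_eq_range']
        exact e1
      refine ⟨by rw [hrow, hfold], ?_⟩
      intro jj h1 h2 i' hi'
      rw [hfold] at h2
      rcases Nat.lt_succ_iff_lt_or_eq.1 hi' with hlt | rfl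
      · exact ih2 jj h1 (fun hx => h2 (e2 _ hx)) i' hlt
      · exact fun h0 => h2 (e3 jj (Nat.zero_le _) h1 h0)

-- peeling the pyRange/pyGetD layer: A's port computes the Nat-index fold
theorem pvFoldlSet_eq (f : List Int → List Int) :
    ∀ (k : Nat) (m : List (List Int)), k ≤ m.length →
      (List.range k).foldl (fun m x => m.set x (f (m.getD x []))) m
        = (m.take k).map f ++ m.drop k := by
  intro k
  induction k with
  | zero => intro m _; simp
  | succ k ih =>
      intro m hk
      have hklt : k < m.length := by omega
      rw [List.range_succ, List.foldl_append]
      rw [ih m (by omega)]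
      have hlen : ((m.take k).map f).length = k := by
        simp [List.length_take]; omega
      have hdrop : m.drop k = m[k] :: m.drop (k + 1) := List.drop_eq_getElem_cons hklt
      simp only [List.foldl_cons, List.foldl_nil]
      rw [List.getD_append_right _ _ _ _ (by omega : (List.map f (List.take k m)).length ≤ k)]
      rw [hlen, Nat.sub_self]
      rw [List.set_append_right _ _ (by omega)]
      rw [hlen, Nat.sub_self, hdrop]
      simp only [List.getD_cons_zero, List.set_cons_zero]
      rw [List.take_succ, List.getElem?_eq_getElem hklt]
      simp only [Option.toList_some, List.map_append, List.map_cons, List.map_nil]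
      simp

theorem pvZeroColumn_eq (m : List (List Int)) (j : Nat) :
    pvZeroColumn m (j : Int) = pvZeroColN m j := by
  unfold pvZeroColumn pvZeroColN
  rw [PySem.List.pyRange_zero_nat, List.foldl_map]
  simp only [PySem.List.pyGetD_natCast, PySem.List.pySetD_natCast]
  rw [pvFoldlSet_eq (fun row => row.set j 0) m.length m le_rfl]
  simp

theorem pvStep_peel (i : Nat) (st : List (List Int) × Int) (j : Nat) :
    (let v := PySem.List.pyGetD (PySem.List.pyGetD st.1 (i : Int) []) (j : Int) 0
     if v ≠ 0 then
       if (i : Int) = 0 then (st.1, st.2 + v)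
       else if PySem.List.pyGetD (PySem.List.pyGetD st.1 ((i : Int) - 1) []) (j : Int) 0 ≠ 0 then
         (st.1, st.2 + v)
       else st
     else (pvZeroColumn st.1 (j : Int), st.2)) = pvStepN i st j := by
  cases i with
  | zero =>
      simp [pvStepN, pvZeroColumn_eq, PySem.List.pyGetD_zero]
  | succ n =>
      have h1 : ((n + 1 : Nat) : Int) - 1 = ((n : Nat) : Int) := by push_cast; ring
      have h2 : ¬(((n + 1 : Nat) : Int) = 0) := by push_cast; omega
      simp only [h1, PySem.List.pyGetD_natCast, pvStepN, pvZeroColumn_eq, if_neg h2]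
      rfl

theorem pvRow_peel (i : Nat) (st : List (List Int) × Int) :
    (PySem.List.pyRange 0 ((PySem.List.pyGetD st.1 (i : Int) []).length) 1).foldl
      (fun st j =>
        let v := PySem.List.pyGetD (PySem.List.pyGetD st.1 (i : Int) []) j 0
        if v ≠ 0 then
          if (i : Int) = 0 then (st.1, st.2 + v)
          else if PySem.List.pyGetD (PySem.List.pyGetD st.1 ((i : Int) - 1) []) j 0 ≠ 0 then
            (st.1, st.2 + v)
          else st
        else (pvZeroColumn st.1 j, st.2))
      st = pvRowN i st := by
  rw [PySem.List.pyGetD_natCast, PySem.List.pyRange_zero_nat, List.foldl_map]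
  unfold pvRowN
  congr 1
  funext st j
  exact pvStep_peel i st j

theorem pvA_eq_N (matrix : List (List Int)) :
    matrixElementsSum matrix
      = ((List.range matrix.length).foldl (fun st i => pvRowN i st) (matrix, 0)).2 := by
  unfold matrixElementsSum
  rw [PySem.List.pyRange_zero_nat, List.foldl_map]
  congr 2
  funext st i
  exact pvRow_peel i st

theorem pvB_eq_rowB (matrix : List (List Int)) :
    matrixElementsSum_alt matrix
      = (matrix.foldl (fun st row => pvRowB row 0 st) ([], 0)).2 := by
  rfl

-- ===== VERDICT (by name: the statement is the Claim_ definition above) =====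
theorem matrixElementsSum_spec : Claim_equal_matrixElementsSum := by
  intro matrix _ hpre
  unfold Spec_matrixElementsSum
  have hsim := pvOuterSim matrix (matrix.headD []).length hpre matrix.length le_rfl
  rw [pvA_eq_N, pvB_eq_rowB, hsim.1, List.take_length]
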